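-- pv_equiv track=rewrite | github.com/ashishsahu1/Code-Clutter | GFG/GFGproblemSet2/noOfProdBuy.py | highestNumberOfProdWeCanBuy
-- ===== SOURCE A (Python) =====
-- def highestNumberOfProdWeCanBuy(lst,k):
--     lst.sort()
--     ans=0
--     i=0
--     while(i<len(lst) and k>lst[i]):
--         ans+=1
--         k-=lst[i]
--         i+=1
--
--     return ans
-- ===== SOURCE B (Python) =====
-- def highestNumberOfProdWeCanBuy(lst, k):
--     lst.sort()
--     prefix = []
--     s = 0
--     for x in lst:
--         s += x
--         prefix.append(s)
--     return next((i for i, s in enumerate(prefix) if s >= k), len(prefix))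
-- ===== Notes on version B (the rewrite author's own statement) =====
-- stated objective: alternative
-- what changed: Replaces the budget-decrementing while-loop over indices by building the prefix-sum array of the sorted list and returning the index of its first element >= k (defaulting to the list length), a takewhile-style decomposition.
import Mathlib
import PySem

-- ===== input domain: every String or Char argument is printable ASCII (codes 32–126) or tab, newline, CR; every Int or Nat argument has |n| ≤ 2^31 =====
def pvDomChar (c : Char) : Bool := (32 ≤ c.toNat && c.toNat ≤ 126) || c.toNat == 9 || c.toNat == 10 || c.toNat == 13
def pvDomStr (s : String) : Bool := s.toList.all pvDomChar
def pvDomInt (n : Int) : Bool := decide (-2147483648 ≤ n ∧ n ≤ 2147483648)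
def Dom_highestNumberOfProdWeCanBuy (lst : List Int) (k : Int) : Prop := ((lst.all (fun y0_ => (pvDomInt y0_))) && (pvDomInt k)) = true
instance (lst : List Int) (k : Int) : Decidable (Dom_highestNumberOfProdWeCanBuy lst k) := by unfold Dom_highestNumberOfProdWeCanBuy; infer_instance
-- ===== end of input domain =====

-- B replaces A's budget-decrementing while-loop by prefix sums + first-index-≥-k search (alternative decomposition; return values proved equal; both sort the argument in place).


-- ===== PORT A =====
-- A's while-loop: counts items while remaining budget k is strictly above the next price, decrementing k.
def pvBuyLoop : List Int → Int → Int
  | [], _ => 0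
  | x :: xs, k => if k > x then 1 + pvBuyLoop xs (k - x) else 0

def highestNumberOfProdWeCanBuy (lst : List Int) (k : Int) : Int :=
  pvBuyLoop (PySem.List.sorted lst (fun x => x) false) k

-- ===== PORT B =====
-- Source B's generator search: index of the first prefix sum ≥ k, else length.
def pvFirstGE (k : Int) : List Int → Int
  | [] => 0
  | s :: rest => if s ≥ k then 0 else 1 + pvFirstGE k rest

def highestNumberOfProdWeCanBuy_alt (lst : List Int) (k : Int) : Int :=
  let prefixSums := ((PySem.List.sorted lst (fun x => x) false).foldl
    (fun (p : List Int × Int) x => (p.1 ++ [p.2 + x], p.2 + x)) (([] : List Int), (0 : Int))).1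
  pvFirstGE k prefixSums

-- ===== PRECONDITION & SPEC =====
def Spec_highestNumberOfProdWeCanBuy (lst : List Int) (k : Int) (out : Int) : Prop := out = highestNumberOfProdWeCanBuy_alt lst k
instance (lst : List Int) (k : Int) (out : Int) : Decidable (Spec_highestNumberOfProdWeCanBuy lst k out) := by unfold Spec_highestNumberOfProdWeCanBuy; infer_instance

-- ===== CLAIM (what is proved, stated in full; the proofs are below) =====
def Claim_equal_highestNumberOfProdWeCanBuy : Prop := ∀ (lst : List Int) (k : Int), Dom_highestNumberOfProdWeCanBuy lst k → Spec_highestNumberOfProdWeCanBuy lst k (highestNumberOfProdWeCanBuy lst k)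

-- ===== LEMMAS AND PROOFS =====
-- Prefix sums of xs starting from running total s.
def pvPrefixes (s : Int) : List Int → List Int
  | [] => []
  | x :: xs => (s + x) :: pvPrefixes (s + x) xs

theorem pvFoldl_prefixes (xs : List Int) (acc : List Int) (s : Int) :
    (xs.foldl (fun (p : List Int × Int) x => (p.1 ++ [p.2 + x], p.2 + x)) (acc, s)).1
      = acc ++ pvPrefixes s xs := by
  induction xs generalizing acc s with
  | nil => simp [pvPrefixes]
  | cons x xs ih =>
      simp only [List.foldl_cons, pvPrefixes]
      rw [ih]
      simp

theorem pvFirstGE_prefixes (xs : List Int) (k s : Int) :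
    pvFirstGE k (pvPrefixes s xs) = pvBuyLoop xs (k - s) := by
  induction xs generalizing s with
  | nil => simp [pvPrefixes, pvFirstGE, pvBuyLoop]
  | cons x xs ih =>
      simp only [pvPrefixes, pvFirstGE, pvBuyLoop]
      split_ifs with h1 h2 h2 <;> try omega
      rw [ih]
      ring_nf

-- ===== VERDICT (by name: the statement is the Claim_ definition above) =====
theorem highestNumberOfProdWeCanBuy_spec : Claim_equal_highestNumberOfProdWeCanBuy := by
  intro lst k _
  unfold Spec_highestNumberOfProdWeCanBuy highestNumberOfProdWeCanBuy highestNumberOfProdWeCanBuy_alt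
  rw [pvFoldl_prefixes]
  simp only [List.nil_append]
  rw [pvFirstGE_prefixes]
  norm_num
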